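-- pv_equiv track=rewrite | github.com/arhamansari11/Advent_of_Code | AOC 25/Day-09/Q2.py | compute_x_bounds_by_y
-- ===== SOURCE A (Python) =====
-- def compute_x_bounds_by_y(horizontal_segments, vertical_segments, all_ys):
--     x_bounds_by_y = {}
--
--     for y in all_ys:
--         x_ranges = []
--
--         if y in horizontal_segments:
--             x_ranges.extend(horizontal_segments[y])
--
--         for seg_x, seg_min_y, seg_max_y in vertical_segments:
--             if seg_min_y <= y <= seg_max_y:
--                 x_ranges.append((seg_x, seg_x))
--
--         if not x_ranges:
--             continue
--
--         x_ranges.sort()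
--
--         merged = []
--         for start, end in x_ranges:
--             if merged and start <= merged[-1][1] + 1:
--                 merged[-1] = (merged[-1][0], max(merged[-1][1], end))
--             else:
--                 merged.append((start, end))
--
--         x_bounds_by_y[y] = (merged[0][0], merged[-1][1])
--
--     return x_bounds_by_y
-- ===== SOURCE B (Python) =====
-- def _upd(lo, hi, s, e):
--     lo = s if lo is None or s < lo else lo
--     hi = e if hi is None or hi < e else hi
--     return lo, hi
--
--
-- def compute_x_bounds_by_y(horizontal_segments, vertical_segments, all_ys):
--     out = {}
--     for y in all_ys:
--         lo = hi = None
--         for s, e in horizontal_segments.get(y, ()):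
--             lo, hi = _upd(lo, hi, s, e)
--         for x, y0, y1 in vertical_segments:
--             if y0 <= y <= y1:
--                 lo, hi = _upd(lo, hi, x, x)
--         if lo is not None:
--             out[y] = (lo, hi)
--     return out
-- ===== Notes on version B (the rewrite author's own statement) =====
-- stated objective: simpler
-- what changed: Per y, B keeps running min-start/max-end accumulators in one fused pass over the horizontal ranges and vertical segments, instead of A's building a span list, sorting it, merging adjacent ranges and reading off the merged endpoints.
-- outside the precondition, e.g. on compute_x_bounds_by_y({0: [(0, 10), (20, 5)]}, [], [0]): A returns {0: (0, 5)}, B returns {0: (0, 10)}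
import Mathlib
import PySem

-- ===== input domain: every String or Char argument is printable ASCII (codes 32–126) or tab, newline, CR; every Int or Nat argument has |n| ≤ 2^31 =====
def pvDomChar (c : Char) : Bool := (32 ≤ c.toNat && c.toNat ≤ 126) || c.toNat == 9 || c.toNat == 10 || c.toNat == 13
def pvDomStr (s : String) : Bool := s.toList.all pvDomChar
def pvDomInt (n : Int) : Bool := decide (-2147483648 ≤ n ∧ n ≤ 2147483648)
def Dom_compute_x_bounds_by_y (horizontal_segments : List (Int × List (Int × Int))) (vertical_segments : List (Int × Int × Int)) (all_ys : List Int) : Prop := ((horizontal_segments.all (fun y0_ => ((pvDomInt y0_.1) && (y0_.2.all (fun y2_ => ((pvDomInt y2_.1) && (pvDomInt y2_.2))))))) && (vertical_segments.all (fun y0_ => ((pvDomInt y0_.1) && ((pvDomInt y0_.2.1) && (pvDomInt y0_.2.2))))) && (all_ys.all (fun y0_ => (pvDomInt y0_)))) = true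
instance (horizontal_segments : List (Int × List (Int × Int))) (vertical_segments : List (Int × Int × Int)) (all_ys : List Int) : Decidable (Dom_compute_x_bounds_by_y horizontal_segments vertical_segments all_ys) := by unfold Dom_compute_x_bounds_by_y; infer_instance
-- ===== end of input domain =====

-- B replaces A's per-y build-sort-merge of a span list by one fused pass keeping running min-start/max-end accumulators (objective: simpler).

-- ===== PORT A =====
-- the in-place update of merged[-1] / append to merged inside A's merge loop
def pvMergeStep (merged : List (Int × Int)) (r : Int × Int) : List (Int × Int) :=
  match merged.getLast? with
  | some last => if r.1 ≤ last.2 + 1 then merged.dropLast ++ [(last.1, max last.2 r.2)] else merged ++ [r]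
  | none => merged ++ [r]

-- body of A's `for y in all_ys` loop
def pvStepA (horizontal_segments : List (Int × List (Int × Int))) (vertical_segments : List (Int × Int × Int)) (d : PySem.Dict Int (Int × Int)) (y : Int) : PySem.Dict Int (Int × Int) :=
  let x_ranges : List (Int × Int) :=
    (match horizontal_segments.find? (fun p => p.1 == y) with | some p => p.2 | none => []) ++
    vertical_segments.foldl (fun acc seg => if seg.2.1 ≤ y ∧ y ≤ seg.2.2 then acc ++ [(seg.1, seg.1)] else acc) []
  if x_ranges.isEmpty then d
  else
    let merged := (PySem.List.sorted2 x_ranges Prod.fst Prod.snd).foldl pvMergeStep []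
    match merged.head?, merged.getLast? with
    | some f, some l => d.insert y (f.1, l.2)
    | _, _ => d    -- unreachable: merged is nonempty when x_ranges is

def compute_x_bounds_by_y (horizontal_segments : List (Int × List (Int × Int))) (vertical_segments : List (Int × Int × Int)) (all_ys : List Int) : List (Int × Int × Int) :=
  (all_ys.foldl (pvStepA horizontal_segments vertical_segments) PySem.Dict.empty).items

-- ===== PORT B =====
-- Source B's `_upd`: fold step updating the running (lo, hi) Option accumulators with one span (s, e)
def pvUpd (st : Option Int × Option Int) (s e : Int) : Option Int × Option Int :=
  ( some (match st.1 with | none => s | some l => if s < l then s else l),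
    some (match st.2 with | none => e | some h => if h < e then e else h) )

-- body of B's `for y in all_ys` loop: two sequential accumulator folds, then the `lo is not None` test
def pvStepB (horizontal_segments : List (Int × List (Int × Int))) (vertical_segments : List (Int × Int × Int)) (d : PySem.Dict Int (Int × Int)) (y : Int) : PySem.Dict Int (Int × Int) :=
  let st0 := ((horizontal_segments.lookup y).getD []).foldl
      (fun st r => pvUpd st r.1 r.2) ((none : Option Int), (none : Option Int))
  let st := vertical_segments.foldl
      (fun st seg => if seg.2.1 ≤ y ∧ y ≤ seg.2.2 then pvUpd st seg.1 seg.1 else st) st0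
  match st with
  | (some lo, some hi) => d.insert y (lo, hi)
  | _ => d

def compute_x_bounds_by_y_alt (horizontal_segments : List (Int × List (Int × Int))) (vertical_segments : List (Int × Int × Int)) (all_ys : List Int) : List (Int × Int × Int) :=
  (all_ys.foldl (pvStepB horizontal_segments vertical_segments) PySem.Dict.empty).items

-- ===== PRECONDITION & SPEC =====
-- Pre_ excludes inputs where the horizontal range list looked up for some queried y contains an inverted
-- range (end < start): such a range denotes an empty span, no bound is specified for it, and A's merge
-- endpoint and B's max-end are two equally defensible readings of that unspecified corner.
def Pre_compute_x_bounds_by_y (horizontal_segments : List (Int × List (Int × Int))) (vertical_segments : List (Int × Int × Int)) (all_ys : List Int) : Prop :=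
  ∀ y ∈ all_ys, ∀ r ∈ (match horizontal_segments.find? (fun p => p.1 == y) with | some p => p.2 | none => []), r.1 ≤ r.2
instance (horizontal_segments : List (Int × List (Int × Int))) (vertical_segments : List (Int × Int × Int)) (all_ys : List Int) : Decidable (Pre_compute_x_bounds_by_y horizontal_segments vertical_segments all_ys) := by unfold Pre_compute_x_bounds_by_y; infer_instance

def pvWitness_compute_x_bounds_by_y : (List (Int × List (Int × Int))) × (List (Int × Int × Int)) × List Int :=
  ([(0, [(1, 3)]), (2, [(7, 7)])], [(5, -1, 2)], [0, 2, 4])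

def Spec_compute_x_bounds_by_y (horizontal_segments : List (Int × List (Int × Int))) (vertical_segments : List (Int × Int × Int)) (all_ys : List Int) (out : List (Int × Int × Int)) : Prop := out = compute_x_bounds_by_y_alt horizontal_segments vertical_segments all_ys
instance (horizontal_segments : List (Int × List (Int × Int))) (vertical_segments : List (Int × Int × Int)) (all_ys : List Int) (out : List (Int × Int × Int)) : Decidable (Spec_compute_x_bounds_by_y horizontal_segments vertical_segments all_ys out) := by unfold Spec_compute_x_bounds_by_y; infer_instance

-- ===== CLAIM (what is proved, stated in full; the proofs are below) =====
def Claim_equal_compute_x_bounds_by_y : Prop := ∀ (horizontal_segments : List (Int × List (Int × Int))) (vertical_segments : List (Int × Int × Int)) (all_ys : List Int), Dom_compute_x_bounds_by_y horizontal_segments vertical_segments all_ys → Pre_compute_x_bounds_by_y horizontal_segments vertical_segments all_ys → Spec_compute_x_bounds_by_y horizontal_segments vertical_segments all_ys (compute_x_bounds_by_y horizontal_segments vertical_segments all_ys)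

-- ===== LEMMAS AND PROOFS =====

-- the lexicographic tuple comparator Python's sort uses on pairs (as sorted2 spells it)
def pvLt (a b : Int × Int) : Bool := decide (a.1 < b.1) || (!decide (b.1 < a.1) && decide (a.2 < b.2))

theorem pvSorted2_eq (xs : List (Int × Int)) :
    PySem.List.sorted2 xs Prod.fst Prod.snd = xs.foldl (fun acc x => PySem.List.insertBy pvLt x acc) [] := rfl

theorem pvLookup_eq (hs : List (Int × List (Int × Int))) (y : Int) :
    (hs.lookup y).getD [] = (match hs.find? (fun p => p.1 == y) with | some p => p.2 | none => []) := by
  induction hs with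
  | nil => rfl
  | cons p t ih =>
    by_cases h : p.1 = y
    · simp [List.lookup, List.find?, h]
    · have h1 : (y == p.1) = false := by simpa using Ne.symm h
      have h2 : (p.1 == y) = false := by simpa using h
      simpa [List.lookup, List.find?, h1, h2] using ih

theorem pvVerts_eq (vs : List (Int × Int × Int)) (y : Int) : ∀ acc : List (Int × Int),
    vs.foldl (fun acc seg => if seg.2.1 ≤ y ∧ y ≤ seg.2.2 then acc ++ [(seg.1, seg.1)] else acc) acc
      = acc ++ vs.filterMap (fun seg => if seg.2.1 ≤ y ∧ y ≤ seg.2.2 then some (seg.1, seg.1) else none) := by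
  induction vs with
  | nil => intro acc; simp
  | cons v t ih => intro acc; by_cases h : v.2.1 ≤ y ∧ y ≤ v.2.2 <;> simp [h, ih]

-- B's conditional vertical fold is the pvUpd-fold over the same filterMap of contributed spans
theorem pvVertsB_eq (vs : List (Int × Int × Int)) (y : Int) : ∀ st : Option Int × Option Int,
    vs.foldl (fun st seg => if seg.2.1 ≤ y ∧ y ≤ seg.2.2 then pvUpd st seg.1 seg.1 else st) st
      = (vs.filterMap (fun seg => if seg.2.1 ≤ y ∧ y ≤ seg.2.2 then some (seg.1, seg.1) else none)).foldl
          (fun st r => pvUpd st r.1 r.2) st := by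
  induction vs with
  | nil => intro st; rfl
  | cons v t ih => intro st; by_cases h : v.2.1 ≤ y ∧ y ≤ v.2.2 <;> simp [h, ih]

theorem pvUpd_some (a b s e : Int) : pvUpd (some a, some b) s e = (some (min a s), some (max b e)) := by
  simp only [pvUpd, Prod.mk.injEq, Option.some.injEq]
  constructor <;> split_ifs <;> omega

theorem pvUpd_fold (t : List (Int × Int)) : ∀ a b : Int,
    t.foldl (fun st r => pvUpd st r.1 r.2) (some a, some b)
      = (some ((t.map Prod.fst).foldl min a), some ((t.map Prod.snd).foldl max b)) := by
  induction t with
  | nil => intro a b; rfl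
  | cons r u ih => intro a b; simp [pvUpd_some, ih]

theorem pvMergeStep_ne (acc : List (Int × Int)) (x : Int × Int) (h : acc ≠ []) :
    pvMergeStep acc x ≠ [] ∧ (pvMergeStep acc x).head?.map Prod.fst = acc.head?.map Prod.fst := by
  obtain ⟨a, t, rfl⟩ := List.exists_cons_of_ne_nil h
  cases hl : (a :: t).getLast? with
  | none => simp at hl
  | some last =>
    simp only [pvMergeStep, hl]
    split_ifs with hc
    · cases t with
      | nil =>
        have ha : a = last := by simpa using hl
        subst ha
        simp
      | cons b u => simp [List.dropLast_cons₂]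
    · simp

theorem pvMerge_head (t : List (Int × Int)) : ∀ acc : List (Int × Int), acc ≠ [] →
    (t.foldl pvMergeStep acc) ≠ [] ∧ (t.foldl pvMergeStep acc).head?.map Prod.fst = acc.head?.map Prod.fst := by
  induction t with
  | nil => intro acc h; exact ⟨h, rfl⟩
  | cons x u ih =>
    intro acc h
    obtain ⟨h1, h2⟩ := pvMergeStep_ne acc x h
    obtain ⟨h3, h4⟩ := ih (pvMergeStep acc x) h1
    exact ⟨h3, by simpa [h2] using h4⟩

theorem pvMerge_last (t : List (Int × Int)) : ∀ (acc : List (Int × Int)) (m : Int),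
    (∀ p ∈ t, p.1 ≤ p.2) → acc.getLast?.map Prod.snd = some m →
    (t.foldl pvMergeStep acc).getLast?.map Prod.snd = some ((t.map Prod.snd).foldl max m) := by
  induction t with
  | nil => intro acc m _ hm; simpa using hm
  | cons x u ih =>
    intro acc m hwf hm
    cases hlast : acc.getLast? with
    | none => simp [hlast] at hm
    | some last =>
      rw [hlast] at hm
      have hm2 : last.2 = m := by simpa using hm
      simp only [List.foldl_cons, List.map_cons]
      by_cases hc : x.1 ≤ last.2 + 1
      · have : pvMergeStep acc x = acc.dropLast ++ [(last.1, max last.2 x.2)] := by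
          simp [pvMergeStep, hlast, hc]
        rw [this, ih _ (max last.2 x.2) (fun p hp => hwf p (List.mem_cons_of_mem _ hp)) (by simp)]
        rw [hm2]
      · have hstep : pvMergeStep acc x = acc ++ [x] := by
          simp [pvMergeStep, hlast, hc]
        have hx : x.1 ≤ x.2 := hwf x List.mem_cons_self
        have hmx : max m x.2 = x.2 := by omega
        rw [hstep, hmx, ih _ x.2 (fun p hp => hwf p (List.mem_cons_of_mem _ hp)) (by simp)]

theorem pvInsertBy_head (x : Int × Int) (y : Int × Int) (t : List (Int × Int)) :
    (PySem.List.insertBy pvLt x (y :: t)).head?.map Prod.fst = some (min x.1 y.1) := by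
  by_cases h : pvLt x y = true
  · have hx : x.1 ≤ y.1 := by simp [pvLt] at h; omega
    simp [PySem.List.insertBy, h]; omega
  · have hy : y.1 ≤ x.1 := by simp [pvLt] at h; omega
    simp [PySem.List.insertBy, h]; omega

theorem pvSortFold_head (xs : List (Int × Int)) : ∀ (acc : List (Int × Int)) (m : Int),
    acc.head?.map Prod.fst = some m →
    ((xs.foldl (fun acc x => PySem.List.insertBy pvLt x acc) acc).head?.map Prod.fst)
      = some ((xs.map Prod.fst).foldl min m) := by
  induction xs with
  | nil => intro acc m hm; simpa using hm
  | cons x u ih =>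
    intro acc m hm
    cases hacc : acc with
    | nil => simp [hacc] at hm
    | cons a t =>
      rw [hacc] at hm
      have hm2 : a.1 = m := by simpa using hm
      simp only [List.foldl_cons, List.map_cons]
      rw [ih _ (min x.1 a.1) (pvInsertBy_head x a t)]
      rw [hm2, min_comm]

theorem pvMaxVal (l1 l2 : List Int) (h : l1.Perm l2) (m1 m2 : Int)
    (h1 : PySem.List.max? l1 (fun x => x) = some m1) (h2 : PySem.List.max? l2 (fun x => x) = some m2) :
    m1 = m2 := by
  have hm1 := PySem.List.max?_mem h1
  have hm2 := PySem.List.max?_mem h2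
  have u1 := PySem.List.max?_isMax h1 m2 (h.mem_iff.mpr hm2)
  have u2 := PySem.List.max?_isMax h2 m1 (h.mem_iff.mp hm1)
  omega

theorem pvStep_eq (hs : List (Int × List (Int × Int))) (vs : List (Int × Int × Int))
    (y : Int)
    (hwf : ∀ r ∈ (match hs.find? (fun p => p.1 == y) with | some p => p.2 | none => []), r.1 ≤ r.2)
    (d : PySem.Dict Int (Int × Int)) :
    pvStepA hs vs d y = pvStepB hs vs d y := by
  simp only [pvStepA, pvStepB, pvVerts_eq, pvVertsB_eq, pvLookup_eq, List.nil_append, ← List.foldl_append]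
  set spans := (match hs.find? (fun p => p.1 == y) with | some p => p.2 | none => []) ++
    vs.filterMap (fun seg => if seg.2.1 ≤ y ∧ y ≤ seg.2.2 then some (seg.1, seg.1) else none) with hspans
  have hwfs : ∀ r ∈ spans, r.1 ≤ r.2 := by
    intro r hr
    rw [hspans] at hr
    rcases List.mem_append.mp hr with h1 | h2
    · cases hf : hs.find? (fun p => p.1 == y) with
      | none => rw [hf] at h1; simp at h1
      | some pr =>
        rw [hf] at h1 hwf
        exact hwf r h1
    · obtain ⟨seg, hseg, heq⟩ := List.mem_filterMap.mp h2
      by_cases hcond : seg.2.1 ≤ y ∧ y ≤ seg.2.2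
      · rw [if_pos hcond] at heq
        injection heq with h
        simp [← h]
      · simp [hcond] at heq
  clear_value spans
  cases spans with
  | nil => rfl
  | cons p t =>
    have hB : (p :: t).foldl (fun st r => pvUpd st r.1 r.2) ((none : Option Int), (none : Option Int))
        = (some ((t.map Prod.fst).foldl min p.1), some ((t.map Prod.snd).foldl max p.2)) := by
      rw [List.foldl_cons]
      have h0 : pvUpd ((none : Option Int), (none : Option Int)) p.1 p.2 = (some p.1, some p.2) := rfl
      rw [h0, pvUpd_fold]
    have hperm := PySem.List.sorted2_perm (p :: t) (Prod.fst (β := Int)) Prod.snd false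
    cases hq : PySem.List.sorted2 (p :: t) Prod.fst Prod.snd with
    | nil =>
      rw [hq] at hperm
      simpa using hperm.length_eq
    | cons q u =>
      rw [hq] at hperm
      have hstart : (PySem.List.sorted2 (p :: t) (Prod.fst (β := Int)) Prod.snd).head?.map Prod.fst
          = some ((t.map Prod.fst).foldl min p.1) := by
        rw [pvSorted2_eq]
        simp only [List.foldl_cons]
        exact pvSortFold_head t _ p.1 (by simp [PySem.List.insertBy])
      rw [hq] at hstart
      have hq1 : q.1 = (t.map Prod.fst).foldl min p.1 := by simpa using hstart
      have hfold : List.foldl pvMergeStep [] (q :: u) = List.foldl pvMergeStep [q] u := by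
        simp [pvMergeStep]
      obtain ⟨hne, hhead⟩ := pvMerge_head u [q] (by simp)
      have hwfu : ∀ r ∈ u, r.1 ≤ r.2 := fun r hr =>
        hwfs r (hperm.subset (List.mem_cons_of_mem _ hr))
      have hlast := pvMerge_last u [q] q.2 hwfu (by simp)
      cases hh : (List.foldl pvMergeStep [q] u).head? with
      | none => exact absurd (List.head?_eq_none_iff.mp hh) hne
      | some f =>
        cases hg : (List.foldl pvMergeStep [q] u).getLast? with
        | none => exact absurd (List.getLast?_eq_none_iff.mp hg) hne
        | some l =>
          rw [hh] at hhead
          rw [hg] at hlast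
          have hf1 : f.1 = q.1 := by simpa using hhead
          have hl2 : l.2 = (u.map Prod.snd).foldl max q.2 := by simpa using hlast
          have hmaxB : PySem.List.max? ((p :: t).map Prod.snd) (fun x => x)
              = some ((t.map Prod.snd).foldl max p.2) := by
            rw [List.map_cons, PySem.List.max?_id_cons]
          have hmaxA : PySem.List.max? ((q :: u).map Prod.snd) (fun x => x)
              = some ((u.map Prod.snd).foldl max q.2) := by
            rw [List.map_cons, PySem.List.max?_id_cons]
          have hmaxeq := pvMaxVal _ _ (hperm.map Prod.snd) _ _ hmaxA hmaxB
          simp only [List.isEmpty_cons, Bool.false_eq_true, if_false, hfold, hh, hg, hB]  -- placeholder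
          rw [hf1, hq1, hl2, hmaxeq]

theorem pvFoldl_eq (hs : List (Int × List (Int × Int))) (vs : List (Int × Int × Int))
    (ys : List Int)
    (hwf : ∀ y ∈ ys, ∀ r ∈ (match hs.find? (fun p => p.1 == y) with | some p => p.2 | none => []), r.1 ≤ r.2) :
    ∀ d, ys.foldl (pvStepA hs vs) d = ys.foldl (pvStepB hs vs) d := by
  induction ys with
  | nil => intro d; rfl
  | cons y t ih =>
    intro d
    rw [List.foldl_cons, List.foldl_cons, pvStep_eq hs vs y (hwf y List.mem_cons_self),
      ih (fun z hz => hwf z (List.mem_cons_of_mem _ hz))]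

-- ===== VERDICT (by name: the statement is the Claim_ definition above) =====
theorem compute_x_bounds_by_y_spec : Claim_equal_compute_x_bounds_by_y := by
  intro hs vs ys _ hpre
  unfold Spec_compute_x_bounds_by_y compute_x_bounds_by_y compute_x_bounds_by_y_alt
  rw [pvFoldl_eq hs vs ys hpre]
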